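-- pv_equiv track=rewrite | github.com/dynamics-research-group/agnetwork | graph_comparison.py | check_adjacency
-- ===== SOURCE A (Python) =====
-- def check_adjacency(cliques, cEdges):
--     """Check that all vertices are adjacent in the cliques found.
--     This function cycles through the clique, initialising and calling
--     the is_connected function which actually performs the adjacency check"""
--     c_cliques = []
--     for clique in cliques:
--         # Set the initial vertex for adjacency search
--         vi = list(clique)[0]
--         v_seen = set()
--         connected = is_connected(clique, v_seen, vi, cEdges)
--         # Does the clique represent a connected graph?
--         if connected == True:
--             c_cliques.append(clique)
--     return c_cliques
--
-- def is_connected(clique, v_seen, vi, cEdges):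
--     """"This algorithm attempts to visit every vertex in the graph once from
--     an initial vertex. It checks whether previously visited vertices are connected
--     to any of the remaining vertices."""
--     # Add the vertex that initiated the search to the list of seen vertices
--     v_seen.add(vi)
--     # If all vertices in the clique can be visited, it must be connected
--     if len(v_seen) == len(clique): return True
--     # Check if the vertices in the clique are connected to any of the seen vertices
--     for v2 in clique:
--         for vi in v_seen:
--             # Exclude any vertices that have already been 'visited'
--             if v2 not in v_seen:
--                 # If the two vertices are connected, proceed
--                 if ((vi,v2) in cEdges) or ((v2,vi) in cEdges):
--                     return is_connected(clique, v_seen, v2, cEdges)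
--     # If not all vertices can be visited, the graph is disconnected
--     return False
-- ===== SOURCE B (Python) =====
-- def check_adjacency(cliques, cEdges):
--     """Keep the cliques that form a connected subgraph: iterative DFS from the
--     first vertex over the edges of cEdges, restricted to the clique's vertices."""
--     c_cliques = []
--     for clique in cliques:
--         members = set(clique)
--         start = next(iter(clique))
--         visited = {start}
--         stack = [start]
--         while stack:
--             u = stack.pop()
--             for a, b in cEdges:
--                 if a == u:
--                     w = b
--                 elif b == u:
--                     w = a
--                 else:
--                     continue
--                 if w in members and w not in visited:
--                     visited.add(w)
--                     stack.append(w)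
--         if len(visited) == len(clique):
--             c_cliques.append(clique)
--     return c_cliques
-- ===== Notes on version B (the rewrite author's own statement) =====
-- stated objective: faster
-- what changed: A re-scans the whole clique and the seen-set recursively, testing edges by list membership at every pair (O(k^3*E) per clique); B runs one iterative stack-based DFS from the first vertex, scanning the edge list once per popped vertex and comparing the visited count to the clique length (O(k*E) per clique).
import Mathlib
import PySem

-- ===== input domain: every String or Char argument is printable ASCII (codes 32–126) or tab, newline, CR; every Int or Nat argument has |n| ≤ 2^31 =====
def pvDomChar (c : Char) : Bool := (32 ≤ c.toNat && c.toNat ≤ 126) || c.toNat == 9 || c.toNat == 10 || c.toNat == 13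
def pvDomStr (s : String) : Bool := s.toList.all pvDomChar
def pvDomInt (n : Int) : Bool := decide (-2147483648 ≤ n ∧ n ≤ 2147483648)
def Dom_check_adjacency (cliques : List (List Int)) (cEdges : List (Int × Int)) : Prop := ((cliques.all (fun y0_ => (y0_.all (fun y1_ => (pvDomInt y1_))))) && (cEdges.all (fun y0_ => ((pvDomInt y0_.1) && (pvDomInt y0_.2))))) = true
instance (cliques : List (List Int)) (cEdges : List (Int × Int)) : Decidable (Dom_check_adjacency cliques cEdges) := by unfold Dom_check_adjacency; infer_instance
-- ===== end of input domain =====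

-- B replaces A's recursive clique×seen-set rescans by one iterative stack-based DFS per clique
-- that scans the edge list once per popped vertex (equality of RETURN values on Pre_).

-- ===== PORT A =====
-- ((vi,v2) in cEdges) or ((v2,vi) in cEdges)
def pyEdge (cEdges : List (Int × Int)) (a b : Int) : Bool :=
  decide ((a, b) ∈ cEdges) || decide ((b, a) ∈ cEdges)

-- the nested 'for v2 in clique: for vi in v_seen:' loops of is_connected, returning the
-- first v2 (in clique order) that triggers the recursive call (which v2 does not depend on
-- the set's iteration order: v2 is eligible iff SOME seen vertex is adjacent to it)
def scanClique (seen : PySem.Set Int) (cEdges : List (Int × Int)) : List Int → Option Int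
  | [] => none
  | v2 :: rest =>
    if (!(PySem.Set.contains seen v2)) && seen.any (fun u => pyEdge cEdges u v2) then some v2
    else scanClique seen cEdges rest

-- is_connected; fuel only makes the Python recursion structural (it never runs out: the seen
-- set grows strictly at each call and is bounded by the clique length, see is_connected_iff)
def is_connected (clique : List Int) (vSeen : PySem.Set Int) (vi : Int) (cEdges : List (Int × Int)) : Nat → Bool
  | 0 => false
  | fuel + 1 =>
    let seen := PySem.Set.add vSeen vi
    if seen.length = clique.length then true
    else
      match scanClique seen cEdges clique with
      | some v2 => is_connected clique seen v2 cEdges fuel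
      | none => false

def check_adjacency (cliques : List (List Int)) (cEdges : List (Int × Int)) : List (List Int) :=
  cliques.foldl (fun acc clique =>
    match clique with
    | [] => acc
    | v0 :: _ =>
      if is_connected clique PySem.Set.empty v0 cEdges (clique.length + 1) then acc ++ [clique]
      else acc) []

-- ===== PORT B =====
-- the 'if a == u: w = b / elif b == u: w = a / else: continue' selection of B's inner loop
def pickW (u : Int) (e : Int × Int) : Option Int :=
  if e.1 = u then some e.2 else if e.2 = u then some e.1 else none

-- B's 'for a, b in cEdges:' inner loop over the edge list

-- B's 'for a, b in cEdges:' inner loop: collect unvisited clique neighbours of u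
def dfsFold (members : PySem.Set Int) (u : Int) (cEdges : List (Int × Int))
    (vs : PySem.Set Int) (st : List Int) : PySem.Set Int × List Int :=
  match cEdges with
  | [] => (vs, st)
  | e :: es =>
    match pickW u e with
    | none => dfsFold members u es vs st
    | some w =>
      if PySem.Set.contains members w && !(PySem.Set.contains vs w) then
        dfsFold members u es (PySem.Set.add vs w) (st ++ [w])
      else dfsFold members u es vs st

-- B's 'while stack:' DFS loop; fuel only makes the while loop structural (it never runs out:
-- each iteration pops one entry and every push adds a new visited vertex, see dfsB_spec)
def dfsB (members : PySem.Set Int) (cEdges : List (Int × Int)) : Nat → List Int → PySem.Set Int → PySem.Set Int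
  | 0, _, visited => visited
  | _ + 1, [], visited => visited
  | fuel + 1, x :: xs, visited =>
    let u := (x :: xs).getLast (by simp)
    let rest := (x :: xs).dropLast
    let p := dfsFold members u cEdges visited rest
    dfsB members cEdges fuel p.2 p.1

def check_adjacency_alt (cliques : List (List Int)) (cEdges : List (Int × Int)) : List (List Int) :=
  cliques.foldl (fun acc clique =>
    match clique with
    | [] => acc
    | v0 :: _ =>
      let members := PySem.Set.ofList clique
      let visited := dfsB members cEdges (clique.length + 1) [v0] (PySem.Set.add PySem.Set.empty v0)
      if visited.length = clique.length then acc ++ [clique] else acc) []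

-- ===== PRECONDITION & SPEC =====
-- Pre_ excludes exactly the inputs on which the Python A raises: an empty clique makes
-- 'list(clique)[0]' raise IndexError.
def Pre_check_adjacency (cliques : List (List Int)) (cEdges : List (Int × Int)) : Prop :=
  ∀ c ∈ cliques, c ≠ []
instance (cliques : List (List Int)) (cEdges : List (Int × Int)) : Decidable (Pre_check_adjacency cliques cEdges) := by unfold Pre_check_adjacency; infer_instance

def pvWitness_check_adjacency : List (List Int) × (List (Int × Int)) := ([[0, 1], [2], [3, 4]], [(0, 1), (3, 5)])

def Spec_check_adjacency (cliques : List (List Int)) (cEdges : List (Int × Int)) (out : List (List Int)) : Prop := out = check_adjacency_alt cliques cEdges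
instance (cliques : List (List Int)) (cEdges : List (Int × Int)) (out : List (List Int)) : Decidable (Spec_check_adjacency cliques cEdges out) := by unfold Spec_check_adjacency; infer_instance

-- ===== CLAIM (what is proved, stated in full; the proofs are below) =====
def Claim_equal_check_adjacency : Prop := ∀ (cliques : List (List Int)) (cEdges : List (Int × Int)), Dom_check_adjacency cliques cEdges → Pre_check_adjacency cliques cEdges → Spec_check_adjacency cliques cEdges (check_adjacency cliques cEdges)

-- ===== LEMMAS AND PROOFS =====

-- one connectivity step inside the clique: the target vertex belongs to the clique and the
-- two vertices are joined by an edge of cEdges (in either orientation)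
def stepRel (clique : List Int) (cEdges : List (Int × Int)) (a b : Int) : Prop :=
  b ∈ clique ∧ ((a, b) ∈ cEdges ∨ (b, a) ∈ cEdges)

-- reachability inside the clique
def ReachP (clique : List Int) (cEdges : List (Int × Int)) (v0 v : Int) : Prop :=
  Relation.ReflTransGen (stepRel clique cEdges) v0 v

-- the common specification both per-clique checks are proved equivalent to:
-- the clique has no duplicate vertices and every vertex is reachable from the start vertex
def GoodP (clique : List Int) (cEdges : List (Int × Int)) (v0 : Int) : Prop :=
  clique.Nodup ∧ ∀ v ∈ clique, ReachP clique cEdges v0 v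

-- a nodup list contained in another list is no longer than it
theorem nodup_subset_length_le {S c : List Int} (hS : S.Nodup) (hsub : ∀ x ∈ S, x ∈ c) :
    S.length ≤ c.length := by
  calc S.length = S.toFinset.card := (List.toFinset_card_of_nodup hS).symm
  _ ≤ c.toFinset.card := Finset.card_le_card (fun x hx => by
        simp only [List.mem_toFinset] at *; exact hsub x hx)
  _ = c.dedup.length := List.card_toFinset c
  _ ≤ c.length := (List.dedup_sublist c).length_le

-- a nodup list contained in c and of c's full length: c is nodup and contained in it
theorem eq_full {S c : List Int} (hS : S.Nodup) (hsub : ∀ x ∈ S, x ∈ c)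
    (hlen : S.length = c.length) : c.Nodup ∧ ∀ x ∈ c, x ∈ S := by
  have hsub' : S.toFinset ⊆ c.toFinset := fun x hx => by
    simp only [List.mem_toFinset] at *; exact hsub x hx
  have h1 : S.toFinset.card = S.length := List.toFinset_card_of_nodup hS
  have h2 : c.toFinset.card = c.dedup.length := List.card_toFinset c
  have h3 : c.dedup.length ≤ c.length := (List.dedup_sublist c).length_le
  have h4 : S.toFinset.card ≤ c.toFinset.card := Finset.card_le_card hsub'
  have h5 : c.dedup.length = c.length := by omega
  have hcN : c.Nodup := by
    rw [← List.dedup_eq_self]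
    exact (List.dedup_sublist c).eq_of_length h5
  have heq : S.toFinset = c.toFinset := Finset.eq_of_subset_of_card_le hsub' (by
    rw [h1, h2, h5, hlen])
  refine ⟨hcN, fun x hx => ?_⟩
  have : x ∈ S.toFinset := heq ▸ List.mem_toFinset.2 hx
  exact List.mem_toFinset.1 this

-- a path leaving S crosses the boundary of S
theorem exists_boundary {r : Int → Int → Prop} {S : List Int} {a b : Int}
    (h : Relation.ReflTransGen r a b) (ha : a ∈ S) (hb : b ∉ S) :
    ∃ x y, x ∈ S ∧ y ∉ S ∧ r x y := by
  induction h with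
  | refl => exact absurd ha hb
  | @tail m b' hp hs ih =>
    by_cases hm : m ∈ S
    · exact ⟨m, b', hm, hb, hs⟩
    · exact ih hm

-- a set closed under r absorbs every path starting inside it
theorem closed_absorb {r : Int → Int → Prop} {S : List Int}
    (hcl : ∀ x ∈ S, ∀ y, r x y → y ∈ S) {a b : Int} (ha : a ∈ S)
    (h : Relation.ReflTransGen r a b) : b ∈ S := by
  induction h with
  | refl => exact ha
  | @tail m b' _ hs ih => exact hcl m ih b' hs

theorem scan_some {seen : PySem.Set Int} {cEdges : List (Int × Int)} {clique : List Int} {v2 : Int}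
    (h : scanClique seen cEdges clique = some v2) :
    v2 ∈ clique ∧ v2 ∉ seen ∧ ∃ u ∈ seen, ((u, v2) ∈ cEdges ∨ (v2, u) ∈ cEdges) := by
  induction clique with
  | nil => simp [scanClique] at h
  | cons hd tl ih =>
    rw [scanClique] at h
    split at h
    · rename_i hcond
      cases h
      simp only [Bool.and_eq_true, Bool.not_eq_true', List.any_eq_true, pyEdge,
        Bool.or_eq_true, decide_eq_true_eq] at hcond
      obtain ⟨h1, u, hu, he⟩ := hcond
      refine ⟨List.mem_cons_self .., ?_, u, hu, he⟩
      exact fun hmem => by rw [(PySem.Set.contains_iff seen v2).2 hmem] at h1; exact absurd h1 (by simp)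
    · obtain ⟨h1, h2, h3⟩ := ih h
      exact ⟨List.mem_cons_of_mem _ h1, h2, h3⟩

theorem scan_none {seen : PySem.Set Int} {cEdges : List (Int × Int)} {clique : List Int}
    (h : scanClique seen cEdges clique = none) :
    ∀ v2 ∈ clique, v2 ∈ seen ∨ ∀ u ∈ seen, ¬((u, v2) ∈ cEdges ∨ (v2, u) ∈ cEdges) := by
  induction clique with
  | nil => simp
  | cons hd tl ih =>
    rw [scanClique] at h
    split at h
    · exact absurd h (by simp)
    · rename_i hcond
      intro v2 hv2
      rcases List.mem_cons.1 hv2 with rfl | hm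
      · simp only [Bool.and_eq_true, Bool.not_eq_true', List.any_eq_true, pyEdge,
          Bool.or_eq_true, decide_eq_true_eq, not_and, not_exists] at hcond
        by_cases hs : v2 ∈ seen
        · exact Or.inl hs
        · right
          intro u hu he
          have : PySem.Set.contains seen v2 = false := by
            simp only [PySem.Set.contains_eq_listContains, List.contains_eq_mem, decide_eq_false_iff_not]
            exact hs
          exact hcond this u hu he
      · exact ih h v2 hm

-- A's recursion decides exactly GoodP
theorem is_connected_iff (clique : List Int) (cEdges : List (Int × Int)) (v0 : Int) :
    ∀ (fuel : Nat) (vSeen : PySem.Set Int) (vi : Int),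
      vSeen.Nodup →
      (∀ v ∈ PySem.Set.add vSeen vi, v ∈ clique ∧ ReachP clique cEdges v0 v) →
      v0 ∈ PySem.Set.add vSeen vi →
      clique.length + 1 ≤ fuel + (PySem.Set.add vSeen vi).length →
      (is_connected clique vSeen vi cEdges fuel = true ↔ GoodP clique cEdges v0) := by
  intro fuel
  induction fuel with
  | zero =>
    intro vSeen vi hN hinv hv0 hfuel
    exfalso
    have hSN : (PySem.Set.add vSeen vi).Nodup := PySem.Set.nodup_add vSeen vi hN
    have := nodup_subset_length_le hSN (fun x hx => (hinv x hx).1)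
    omega
  | succ fuel ih =>
    intro vSeen vi hN hinv hv0 hfuel
    have hSN : (PySem.Set.add vSeen vi).Nodup := PySem.Set.nodup_add vSeen vi hN
    set S := PySem.Set.add vSeen vi with hS
    rw [is_connected]
    by_cases hlen : S.length = clique.length
    · rw [if_pos hlen]
      simp only [true_iff]
      obtain ⟨hcN, hmem⟩ := eq_full hSN (fun x hx => (hinv x hx).1) hlen
      exact ⟨hcN, fun v hv => (hinv v (hmem v hv)).2⟩
    · rw [if_neg hlen]
      cases hscan : scanClique S cEdges clique with
      | some v2 =>
        obtain ⟨hv2c, hv2S, u, huS, hedge⟩ := scan_some hscan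
        have hlen' : (PySem.Set.add S v2).length = S.length + 1 := by
          rw [PySem.Set.add_of_not_mem hv2S, List.length_append, List.length_singleton]
        apply ih S v2 hSN
        · intro v hv
          rcases (PySem.Set.mem_add S v2 v).1 hv with hv | rfl
          · exact hinv v hv
          · exact ⟨hv2c, ((hinv u huS).2).tail ⟨hv2c, hedge⟩⟩
        · exact (PySem.Set.mem_add S v2 v0).2 (Or.inl hv0)
        · omega
      | none =>
        simp only [Bool.false_eq_true, false_iff]
        intro ⟨hcN, hreach⟩
        -- there is a clique vertex outside S
        have hSle : S.length ≤ clique.length := nodup_subset_length_le hSN (fun x hx => (hinv x hx).1)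
        have hex : ∃ w ∈ clique, w ∉ S := by
          by_contra hall
          push Not at hall
          have := ((List.perm_ext_iff_of_nodup hSN hcN).2
            (fun x => ⟨fun h => (hinv x h).1, fun h => hall x h⟩)).length_eq
          exact hlen this
        obtain ⟨w, hwc, hwS⟩ := hex
        obtain ⟨x, y, hxS, hyS, hstep⟩ := exists_boundary (hreach w hwc) hv0 hwS
        rcases scan_none hscan y hstep.1 with h | h
        · exact hyS h
        · exact h x hxS hstep.2

-- the 'if a == u: w = b / elif b == u: w = a / else: continue' selection of B's inner loop

theorem pickW_some {u : Int} {e : Int × Int} {w : Int} :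
    pickW u e = some w ↔ (e = (u, w) ∨ e = (w, u)) := by
  obtain ⟨a, b⟩ := e
  unfold pickW
  split_ifs with h1 h2 <;>
    simp only [Option.some.injEq, Prod.mk.injEq, false_iff, not_or, not_and] <;>
    omega

theorem pickW_none {u : Int} {e : Int × Int} (h : pickW u e = none) :
    ∀ w : Int, e ≠ (u, w) ∧ e ≠ (w, u) := by
  intro w
  unfold pickW at h
  split_ifs at h with h1 h2
  exact ⟨fun hh => h1 (by rw [hh]), fun hh => h2 (by rw [hh])⟩

-- one edge-list scan of B's DFS: the new visited set, the pushed entries, and the lengths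
theorem dfsFold_spec (members : PySem.Set Int) (u : Int) :
    ∀ (cEdges : List (Int × Int)) (vs : PySem.Set Int) (st : List Int), vs.Nodup →
      (dfsFold members u cEdges vs st).1.Nodup ∧
      (∀ x, x ∈ (dfsFold members u cEdges vs st).1 ↔
        x ∈ vs ∨ (x ∈ members ∧ ((u, x) ∈ cEdges ∨ (x, u) ∈ cEdges))) ∧
      (∃ news, (dfsFold members u cEdges vs st).2 = st ++ news ∧
        (∀ y ∈ news, y ∈ (dfsFold members u cEdges vs st).1)) ∧
      (∀ x, x ∈ (dfsFold members u cEdges vs st).1 → x ∉ vs → x ∈ (dfsFold members u cEdges vs st).2) ∧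
      (dfsFold members u cEdges vs st).2.length + vs.length = st.length + (dfsFold members u cEdges vs st).1.length := by
  intro cEdges
  induction cEdges with
  | nil =>
    intro vs st hN
    exact ⟨hN, by simp [dfsFold], ⟨[], by simp [dfsFold], by simp⟩,
      fun x hx hnx => absurd hx hnx, by simp [dfsFold]⟩
  | cons e es ih =>
    intro vs st hN
    rw [dfsFold]
    have hmemiff : ∀ x : Int, ((u, x) ∈ e :: es ∨ (x, u) ∈ e :: es) ↔
        ((e = (u, x) ∨ e = (x, u)) ∨ ((u, x) ∈ es ∨ (x, u) ∈ es)) := by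
      intro x
      simp only [List.mem_cons]
      constructor
      · rintro ((h | h) | (h | h))
        · exact Or.inl (Or.inl h.symm)
        · exact Or.inr (Or.inl h)
        · exact Or.inl (Or.inr h.symm)
        · exact Or.inr (Or.inr h)
      · rintro ((h | h) | (h | h))
        · exact Or.inl (Or.inl h.symm)
        · exact Or.inr (Or.inl h.symm)
        · exact Or.inl (Or.inr h)
        · exact Or.inr (Or.inr h)
    cases hpick : pickW u e with
    | none =>
      dsimp only
      obtain ⟨jN, jmem, jst, jcomp, jlen⟩ := ih vs st hN
      refine ⟨jN, ?_, jst, jcomp, jlen⟩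
      intro x
      rw [jmem x, hmemiff x]
      have := pickW_none hpick x
      tauto
    | some w =>
      dsimp only
      have hw : e = (u, w) ∨ e = (w, u) := pickW_some.1 hpick
      have hcand : ∀ x : Int, (e = (u, x) ∨ e = (x, u)) ↔ x = w := by
        intro x
        rw [← pickW_some, hpick]
        simp [eq_comm]
      by_cases hc : (PySem.Set.contains members w && !PySem.Set.contains vs w) = true
      · rw [if_pos hc]
        simp only [Bool.and_eq_true, Bool.not_eq_true'] at hc
        have hwm : w ∈ members := (PySem.Set.contains_iff members w).1 hc.1
        have hwvs : w ∉ vs := fun hmem => by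
          rw [(PySem.Set.contains_iff vs w).2 hmem] at hc; exact absurd hc.2 (by simp)
        obtain ⟨jN, jmem, ⟨news, jst, jnews⟩, jcomp, jlen⟩ :=
          ih (PySem.Set.add vs w) (st ++ [w]) (PySem.Set.nodup_add vs w hN)
        refine ⟨jN, ?_, ⟨w :: news, by simpa using jst, ?_⟩, ?_, ?_⟩
        · intro x
          rw [jmem x, PySem.Set.mem_add, hmemiff x]
          have := hcand x
          constructor
          · rintro ((hx | rfl) | ⟨hxm, hx⟩)
            · exact Or.inl hx
            · exact Or.inr ⟨hwm, Or.inl (this.2 rfl)⟩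
            · exact Or.inr ⟨hxm, Or.inr hx⟩
          · rintro (hx | ⟨hxm, hx | hx⟩)
            · exact Or.inl (Or.inl hx)
            · exact Or.inl (Or.inr (this.1 hx))
            · exact Or.inr ⟨hxm, hx⟩
        · intro y hy
          rcases List.mem_cons.1 hy with rfl | hy
          · exact (jmem y).2 (Or.inl ((PySem.Set.mem_add vs y y).2 (Or.inr rfl)))
          · exact jnews y hy
        · intro x hx hxvs
          by_cases hxw : x = w
          · subst hxw
            rw [jst]; exact List.mem_append_left _ (by simp)
          · refine jcomp x hx (fun hmem => ?_)
            rcases (PySem.Set.mem_add vs w x).1 hmem with h | h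
            · exact hxvs h
            · exact hxw h
        · have : (PySem.Set.add vs w).length = vs.length + 1 := by
            rw [PySem.Set.add_of_not_mem hwvs, List.length_append, List.length_singleton]
          simp only [List.length_append, List.length_singleton] at jlen ⊢
          omega
      · rw [if_neg hc]
        simp only [Bool.and_eq_true, Bool.not_eq_true', not_and] at hc
        obtain ⟨jN, jmem, jst, jcomp, jlen⟩ := ih vs st hN
        refine ⟨jN, ?_, jst, jcomp, jlen⟩
        intro x
        rw [jmem x, hmemiff x]
        have hcx := hcand x
        constructor
        · rintro (hx | ⟨hxm, hx⟩)
          · exact Or.inl hx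
          · exact Or.inr ⟨hxm, Or.inr hx⟩
        · rintro (hx | ⟨hxm, hx | hx⟩)
          · exact Or.inl hx
          · -- x = w; w is in members, hence must already be visited
            have hxw : x = w := hcx.1 hx
            subst hxw
            have hnc := hc ((PySem.Set.contains_iff members x).2 hxm)
            have hct : PySem.Set.contains vs x = true := by
              rcases Bool.eq_false_or_eq_true (PySem.Set.contains vs x) with h | h
              · exact h
              · exact absurd h hnc
            exact Or.inl ((PySem.Set.contains_iff vs x).1 hct)
          · exact Or.inr ⟨hxm, hx⟩

-- B's DFS ends in a closed set of reachable clique vertices containing the start set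
theorem dfsB_spec (clique : List Int) (cEdges : List (Int × Int)) (v0 : Int)
    (members : PySem.Set Int) (hm : ∀ x, x ∈ members ↔ x ∈ clique) :
    ∀ (fuel : Nat) (st : List Int) (vs : PySem.Set Int),
      vs.Nodup →
      (∀ v ∈ vs, v ∈ clique ∧ ReachP clique cEdges v0 v) →
      v0 ∈ vs →
      (∀ y ∈ st, y ∈ vs) →
      (∀ x ∈ vs, x ∉ st → ∀ w, w ∈ clique → ((x, w) ∈ cEdges ∨ (w, x) ∈ cEdges) → w ∈ vs) →
      members.Nodup →
      st.length + members.length ≤ fuel + vs.length →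
      (dfsB members cEdges fuel st vs).Nodup ∧
      (∀ v ∈ dfsB members cEdges fuel st vs, v ∈ clique ∧ ReachP clique cEdges v0 v) ∧
      v0 ∈ dfsB members cEdges fuel st vs ∧
      (∀ x ∈ dfsB members cEdges fuel st vs, ∀ w, w ∈ clique →
        ((x, w) ∈ cEdges ∨ (w, x) ∈ cEdges) → w ∈ dfsB members cEdges fuel st vs) := by
  intro fuel
  induction fuel with
  | zero =>
    intro st vs hN hinv hv0 hstvs hcl hmN hfuel
    have hvsm : vs.length ≤ members.length :=
      nodup_subset_length_le hN (fun x hx => (hm x).2 (hinv x hx).1)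
    have hst : st = [] := List.length_eq_zero_iff.1 (by omega)
    subst hst
    exact ⟨hN, hinv, hv0, fun x hx w hw he => hcl x hx (List.not_mem_nil) w hw he⟩
  | succ fuel ih =>
    intro st vs hN hinv hv0 hstvs hcl hmN hfuel
    cases st with
    | nil =>
      exact ⟨hN, hinv, hv0, fun x hx w hw he => hcl x hx (List.not_mem_nil) w hw he⟩
    | cons x0 xs =>
      rw [dfsB]
      set st := x0 :: xs with hstdef
      have hstne : st ≠ [] := by simp [hstdef]
      set u := st.getLast (by simp [hstdef]) with hu
      set rest := st.dropLast with hrest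
      have hsplit : rest ++ [u] = st := List.dropLast_concat_getLast (by simp [hstdef])
      have huvs : u ∈ vs := hstvs u (List.getLast_mem _)
      obtain ⟨jN, jmem, ⟨news, jst, jnews⟩, jcomp, jlen⟩ :=
        dfsFold_spec members u cEdges vs rest hN
      set p := dfsFold members u cEdges vs rest with hp
      have hsub : ∀ v ∈ vs, v ∈ p.1 := fun v hv => (jmem v).2 (Or.inl hv)
      apply ih p.2 p.1 jN
      · intro v hv
        rcases (jmem v).1 hv with h | ⟨hvm, hedge⟩
        · exact hinv v h
        · exact ⟨(hm v).1 hvm, ((hinv u huvs).2).tail ⟨(hm v).1 hvm, hedge⟩⟩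
      · exact hsub v0 hv0
      · intro y hy
        rw [jst] at hy
        rcases List.mem_append.1 hy with h | h
        · exact hsub y (hstvs y (by rw [← hsplit]; exact List.mem_append_left _ h))
        · exact jnews y h
      · intro x hx hxst w hw he
        by_cases hxvs : x ∈ vs
        · by_cases hxu : x = u
          · subst hxu
            exact (jmem w).2 (Or.inr ⟨(hm w).2 hw, he⟩)
          · have hxrest : x ∉ rest := fun hr => hxst (by rw [jst]; exact List.mem_append_left _ hr)
            have hxstold : x ∉ st := by
              rw [← hsplit]
              intro hmem
              rcases List.mem_append.1 hmem with h | h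
              · exact hxrest h
              · exact hxu (List.mem_singleton.1 h)
            exact hsub w (hcl x hxvs hxstold w hw he)
        · exact absurd (jcomp x hx hxvs) hxst
      · exact hmN
      · have h1 : rest.length = st.length - 1 := by
          rw [hrest, List.length_dropLast]
        have h2 : 1 ≤ st.length := by simp [hstdef]
        omega

theorem start_set : PySem.Set.add PySem.Set.empty (v0 : Int) = [v0] := by
  rfl

-- the two per-clique tests agree on a nonempty clique: both decide GoodP
theorem per_clique_eq (v0 : Int) (tl : List Int) (cEdges : List (Int × Int)) :
    ((is_connected (v0 :: tl) PySem.Set.empty v0 cEdges ((v0 :: tl).length + 1) = true) ↔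
    ((dfsB (PySem.Set.ofList (v0 :: tl)) cEdges ((v0 :: tl).length + 1) [v0]
        (PySem.Set.add PySem.Set.empty v0)).length = (v0 :: tl).length)) := by
  set clique := v0 :: tl with hcl
  have hv0c : v0 ∈ clique := List.mem_cons_self ..
  have hstart : ∀ v ∈ ([v0] : List Int), v ∈ clique ∧ ReachP clique cEdges v0 v := by
    intro v hv
    rw [List.mem_singleton] at hv
    subst hv
    exact ⟨hv0c, Relation.ReflTransGen.refl⟩
  -- A's recursion computes GoodP
  have hA := is_connected_iff clique cEdges v0 (clique.length + 1) PySem.Set.empty v0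
    List.nodup_nil (by rw [start_set]; exact hstart) (by rw [start_set]; exact List.mem_singleton.2 rfl)
    (by rw [start_set]; simp)
  rw [hA]
  -- B's DFS computes a closed reachable vertex set
  have hmN : (PySem.Set.ofList clique).Nodup := PySem.Set.nodup_ofList clique
  have hm : ∀ x, x ∈ PySem.Set.ofList clique ↔ x ∈ clique := fun x => PySem.Set.mem_ofList clique x
  obtain ⟨VN, Vinv, Vv0, Vcl⟩ := dfsB_spec clique cEdges v0 (PySem.Set.ofList clique) hm
    (clique.length + 1) [v0] (PySem.Set.add PySem.Set.empty v0)
    (by rw [start_set]; exact List.nodup_singleton v0)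
    (by rw [start_set]; exact hstart)
    (by rw [start_set]; exact List.mem_singleton.2 rfl)
    (by rw [start_set]; exact fun y hy => hy)
    (by rw [start_set]
        intro x hx hnx
        exact absurd hx hnx)
    hmN
    (by have := PySem.Set.length_ofList_le clique
        simp only [List.length_singleton]
        omega)
  set V := dfsB (PySem.Set.ofList clique) cEdges (clique.length + 1) [v0]
    (PySem.Set.add PySem.Set.empty v0) with hV
  constructor
  · rintro ⟨hcN, hreach⟩
    have hclosed : ∀ x ∈ V, ∀ y, stepRel clique cEdges x y → y ∈ V :=
      fun x hx y hs => Vcl x hx y hs.1 hs.2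
    have hsub : ∀ v ∈ clique, v ∈ V := fun v hv =>
      closed_absorb hclosed Vv0 (hreach v hv)
    exact ((List.perm_ext_iff_of_nodup VN hcN).2
      (fun x => ⟨fun h => (Vinv x h).1, fun h => hsub x h⟩)).length_eq
  · intro hlen
    obtain ⟨hcN, hmem⟩ := eq_full VN (fun x hx => (Vinv x hx).1) hlen
    exact ⟨hcN, fun v hv => (Vinv v (hmem v hv)).2⟩

-- the two output folds agree when every clique is nonempty
theorem fold_eq (cEdges : List (Int × Int)) :
    ∀ (cliques : List (List Int)) (acc : List (List Int)), (∀ c ∈ cliques, c ≠ []) →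
      cliques.foldl (fun acc clique =>
        match clique with
        | [] => acc
        | v0 :: _ =>
          if is_connected clique PySem.Set.empty v0 cEdges (clique.length + 1) then acc ++ [clique]
          else acc) acc =
      cliques.foldl (fun acc clique =>
        match clique with
        | [] => acc
        | v0 :: _ =>
          let members := PySem.Set.ofList clique
          let visited := dfsB members cEdges (clique.length + 1) [v0] (PySem.Set.add PySem.Set.empty v0)
          if visited.length = clique.length then acc ++ [clique] else acc) acc := by
  intro cliques
  induction cliques with
  | nil => intro acc _; rfl
  | cons c cs ih =>
    intro acc h
    cases c with
    | nil => exact absurd rfl (h [] (List.mem_cons_self ..))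
    | cons v0 tl =>
      simp only [List.foldl_cons]
      rw [if_congr (per_clique_eq v0 tl cEdges) rfl rfl]
      exact ih _ (fun c hc => h c (List.mem_cons_of_mem _ hc))

-- ===== VERDICT (by name: the statement is the Claim_ definition above) =====
theorem check_adjacency_spec : Claim_equal_check_adjacency := by
  intro cliques cEdges _hdom hpre
  unfold Spec_check_adjacency check_adjacency check_adjacency_alt
  exact fold_eq cEdges cliques [] hpre
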